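-- pv_equiv track=rewrite | github.com/ahmadnouh97/my-second-memory | backend/app/services/whitelist_service.py | is_email_allowed
-- ===== SOURCE A (Python) =====
-- from collections.abc import Iterable
--
-- def is_email_allowed(email: str, patterns: Iterable[str]) -> bool:
--     """Return True if email matches any pattern in the whitelist.
--
--     Patterns:
--       "*"           — allow any email
--       "*@domain"    — allow any email whose domain matches exactly
--       "user@domain" — exact match (case-insensitive)
--
--     Empty patterns → False (fail-closed).
--     """
--     normalized = email.lower().strip()
--     for pattern in patterns:
--         p = pattern.lower().strip()
--         if not p:
--             continue
--         if p == "*":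
--             return True
--         if p.startswith("*@"):
--             domain = p[2:]
--             if normalized.endswith("@" + domain):
--                 return True
--         elif normalized == p:
--             return True
--     return False
-- ===== SOURCE B (Python) =====
-- def is_email_allowed(email, patterns):
--     """Two-phase: bucket normalized patterns into a star flag, an exact set
--     and a domain-suffix list, then test the email against the buckets."""
--     normalized = email.lower().strip()
--     has_star = False
--     exact = set()
--     domains = []
--     for pattern in patterns:
--         p = pattern.lower().strip()
--         if not p:
--             continue
--         if p == "*":
--             has_star = True
--         elif p.startswith("*@"):
--             domains.append(p[2:])
--         else:
--             exact.add(p)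
--     if has_star or normalized in exact:
--         return True
--     return any(normalized.endswith("@" + d) for d in domains)
-- ===== Notes on version B (the rewrite author's own statement) =====
-- stated objective: alternative
-- what changed: Replaces the fused per-pattern early-return loop by a two-phase algorithm: one pass buckets normalized patterns into a star flag, an exact-match set and a domain-suffix list, and a second phase tests the email against those prebuilt containers.
import Mathlib
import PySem

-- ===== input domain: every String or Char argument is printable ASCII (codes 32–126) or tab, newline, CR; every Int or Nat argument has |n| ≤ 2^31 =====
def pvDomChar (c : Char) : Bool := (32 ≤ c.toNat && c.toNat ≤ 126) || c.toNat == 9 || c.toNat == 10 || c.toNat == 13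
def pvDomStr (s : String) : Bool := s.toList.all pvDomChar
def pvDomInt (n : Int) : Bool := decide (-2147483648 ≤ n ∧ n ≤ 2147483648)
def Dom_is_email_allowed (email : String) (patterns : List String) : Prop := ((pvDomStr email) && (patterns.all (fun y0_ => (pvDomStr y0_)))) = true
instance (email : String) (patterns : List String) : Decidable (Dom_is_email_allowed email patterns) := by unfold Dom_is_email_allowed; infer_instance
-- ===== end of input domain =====

-- B replaces A's fused early-return loop with a two-phase bucketing algorithm (star flag /
-- exact set / domain-suffix list built first, email tested second); same cost, alternative structure.

-- ===== PORT A =====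
-- the for-loop with early 'return True' becomes structural recursion over patterns
def pvALoop (normalized : String) : List String → Bool
  | [] => false
  | pattern :: rest =>
    let p := PySem.Str.strip (PySem.Str.lower pattern)
    if p = "" then pvALoop normalized rest
    else if p = "*" then true
    else if PySem.Str.startswith p "*@" then
      let domain := PySem.Str.slice p (some 2) none
      if PySem.Str.endswith normalized ("@" ++ domain) then true
      else pvALoop normalized rest
    else if normalized = p then true
    else pvALoop normalized rest

def is_email_allowed (email : String) (patterns : List String) : Bool :=
  let normalized := PySem.Str.strip (PySem.Str.lower email)
  pvALoop normalized patterns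

-- ===== PORT B =====
-- first pass: fold building (has_star, exact set, domain list)
def pvBuckets (patterns : List String) : Bool × PySem.Set String × List String :=
  patterns.foldl
    (fun st pattern =>
      let p := PySem.Str.strip (PySem.Str.lower pattern)
      if p = "" then st
      else if p = "*" then (true, st.2.1, st.2.2)
      else if PySem.Str.startswith p "*@" then (st.1, st.2.1, st.2.2 ++ [PySem.Str.slice p (some 2) none])
      else (st.1, PySem.Set.add st.2.1 p, st.2.2))
    (false, PySem.Set.empty, [])

def is_email_allowed_alt (email : String) (patterns : List String) : Bool :=
  let normalized := PySem.Str.strip (PySem.Str.lower email)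
  let st := pvBuckets patterns
  if st.1 || PySem.Set.contains st.2.1 normalized then true
  else st.2.2.any (fun d => PySem.Str.endswith normalized ("@" ++ d))

-- ===== PRECONDITION & SPEC =====
def Spec_is_email_allowed (email : String) (patterns : List String) (out : Bool) : Prop := out = is_email_allowed_alt email patterns
instance (email : String) (patterns : List String) (out : Bool) : Decidable (Spec_is_email_allowed email patterns out) := by unfold Spec_is_email_allowed; infer_instance

-- ===== CLAIM (what is proved, stated in full; the proofs are below) =====
def Claim_equal_is_email_allowed : Prop := ∀ (email : String) (patterns : List String), Dom_is_email_allowed email patterns → Spec_is_email_allowed email patterns (is_email_allowed email patterns)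

-- ===== LEMMAS AND PROOFS =====

-- the per-pattern match predicate both programs decide
def pvMatch (normalized pattern : String) : Bool :=
  let p := PySem.Str.strip (PySem.Str.lower pattern)
  if p = "" then false
  else if p = "*" then true
  else if PySem.Str.startswith p "*@" then
    PySem.Str.endswith normalized ("@" ++ PySem.Str.slice p (some 2) none)
  else normalized = p

lemma pvALoop_eq_any (normalized : String) (patterns : List String) :
    pvALoop normalized patterns = patterns.any (pvMatch normalized) := by
  induction patterns with
  | nil => rfl
  | cons pattern rest ih =>
    simp only [pvALoop, pvMatch, List.any_cons, ← ih]
    split_ifs <;> simp_all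

-- membership after set.add (specialised from the pysem simp set)
lemma pvContains_add (s : PySem.Set String) (p x : String) :
    PySem.Set.contains (PySem.Set.add s p) x
      = (PySem.Set.contains s x || decide (x = p)) := by
  simp [pysem]

-- checking the email against a bucket state
def pvCheck (normalized : String) (st : Bool × PySem.Set String × List String) : Bool :=
  st.1 || PySem.Set.contains st.2.1 normalized
       || st.2.2.any (fun d => PySem.Str.endswith normalized ("@" ++ d))

lemma pvCheck_foldl (normalized : String) (patterns : List String)
    (st : Bool × PySem.Set String × List String) :
    pvCheck normalized (patterns.foldl
      (fun st pattern =>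
        let p := PySem.Str.strip (PySem.Str.lower pattern)
        if p = "" then st
        else if p = "*" then (true, st.2.1, st.2.2)
        else if PySem.Str.startswith p "*@" then (st.1, st.2.1, st.2.2 ++ [PySem.Str.slice p (some 2) none])
        else (st.1, PySem.Set.add st.2.1 p, st.2.2)) st)
    = (pvCheck normalized st || patterns.any (pvMatch normalized)) := by
  induction patterns generalizing st with
  | nil => simp
  | cons pattern rest ih =>
    simp only [List.foldl_cons, List.any_cons, ih]
    have hstep : pvCheck normalized
        (let p := PySem.Str.strip (PySem.Str.lower pattern)
         if p = "" then st
         else if p = "*" then (true, st.2.1, st.2.2)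
         else if PySem.Str.startswith p "*@" then (st.1, st.2.1, st.2.2 ++ [PySem.Str.slice p (some 2) none])
         else (st.1, PySem.Set.add st.2.1 p, st.2.2))
        = (pvCheck normalized st || pvMatch normalized pattern) := by
      simp only [pvCheck, pvMatch]
      split_ifs with h1 h2 h3
      · simp
      · cases st.1 <;> simp
      · simp [Bool.or_assoc]
      · rw [pvContains_add]
        simp [Bool.or_assoc, Bool.or_comm, Bool.or_left_comm]
    rw [hstep]
    cases pvMatch normalized pattern <;>
      simp [Bool.or_comm]

-- ===== VERDICT (by name: the statement is the Claim_ definition above) =====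
theorem is_email_allowed_spec : Claim_equal_is_email_allowed := by
  intro email patterns _
  unfold Spec_is_email_allowed is_email_allowed is_email_allowed_alt pvBuckets
  rw [pvALoop_eq_any]
  have h := pvCheck_foldl (PySem.Str.strip (PySem.Str.lower email)) patterns
      (false, PySem.Set.empty, [])
  have h0 : pvCheck (PySem.Str.strip (PySem.Str.lower email))
      ((false : Bool), (PySem.Set.empty : PySem.Set String), ([] : List String)) = false := by
    simp [pvCheck, pysem, PySem.Set.empty]
  rw [h0, Bool.false_or] at h
  rw [← h]
  simp only [pvCheck]
  cases h1 : (patterns.foldl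
      (fun st pattern =>
        let p := PySem.Str.strip (PySem.Str.lower pattern)
        if p = "" then st
        else if p = "*" then (true, st.2.1, st.2.2)
        else if PySem.Str.startswith p "*@" then (st.1, st.2.1, st.2.2 ++ [PySem.Str.slice p (some 2) none])
        else (st.1, PySem.Set.add st.2.1 p, st.2.2))
      ((false : Bool), (PySem.Set.empty : PySem.Set String), ([] : List String))).1 <;>
    cases h2 : PySem.Set.contains (patterns.foldl
      (fun st pattern =>
        let p := PySem.Str.strip (PySem.Str.lower pattern)
        if p = "" then st
        else if p = "*" then (true, st.2.1, st.2.2)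
        else if PySem.Str.startswith p "*@" then (st.1, st.2.1, st.2.2 ++ [PySem.Str.slice p (some 2) none])
        else (st.1, PySem.Set.add st.2.1 p, st.2.2))
      ((false : Bool), (PySem.Set.empty : PySem.Set String), ([] : List String))).2.1
      (PySem.Str.strip (PySem.Str.lower email)) <;>
    simp_all
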